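-- pv_equiv track=rewrite | github.com/pypi-data/pypi-mirror-80 | packages/py-hopscotch-dict/py-hopscotch-dict-2.0.1.tar.gz/py-hopscotch-dict-2.0.1/src/py_hopscotch_dict/hopscotchdict.py | _get_displaced_neighbors
-- ===== SOURCE A (Python) =====
-- from typing import (Any,
-- 					Callable,
-- 					cast,
-- 					Hashable,
-- 					ItemsView,
-- 					Iterator,
-- 					KeysView,
-- 					List,
-- 					MutableMapping,
-- 					Optional,
-- 					Set,
-- 					Tuple,
-- 					Union,
-- 					ValuesView
-- 					)
--
-- def _get_displaced_neighbors(lookup_idx: int,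
-- 							 nbhd: int,
-- 							 nbhd_size: int,
-- 							 max_size: int) -> List[int]:
-- 	"""
-- 	Find the indices in _lookup_table that supposedly relate to a key that
-- 	originally mapped to the given index, but were displaced during some
-- 	previous _free_up call
--
-- 	:param lookup_idx: The index in _lookup_table to find displaced
-- 					   neighbors for
-- 	:param nbhd: The neighborhood at lookup_idx
-- 	:param nbhd_size: The size of the given neighborhood
-- 	:param max_size: The current maximum size of the dict
--
-- 	:return: Indices in _lookup_table that supposedly have data that would
-- 			 be stored at lookup_idx were it empty at the time of insertion
-- 	"""
-- 	if lookup_idx < 0: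
-- 		raise ValueError("Indexes cannot be negative")
-- 	elif lookup_idx >= max_size:
-- 		raise ValueError("Index {0} outside array".format(lookup_idx))
--
-- 	result = []
--
-- 	for i in range(nbhd_size):
-- 		if nbhd & (1 << i) > 0:
-- 			result.append((lookup_idx + i) % max_size)
--
-- 	return result
-- ===== SOURCE B (Python) =====
-- def _get_displaced_neighbors(lookup_idx, nbhd, nbhd_size, max_size):
-- 	if lookup_idx < 0:
-- 		raise ValueError("Indexes cannot be negative")
-- 	elif lookup_idx >= max_size:
-- 		raise ValueError("Index {0} outside array".format(lookup_idx))
--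
-- 	result = []
-- 	# Restrict the neighborhood to its valid bit window, then walk only the
-- 	# set bits, lowest first, clearing each as it is consumed.
-- 	mask = nbhd & ((1 << nbhd_size) - 1) if nbhd_size > 0 else 0
-- 	while mask:
-- 		i = (mask & -mask).bit_length() - 1
-- 		result.append((lookup_idx + i) % max_size)
-- 		mask &= mask - 1
-- 	return result
-- ===== Notes on version B (the rewrite author's own statement) =====
-- stated objective: faster
-- what changed: Instead of testing every bit position 0..nbhd_size-1 of the neighborhood, B masks nbhd to its nbhd_size-bit window once and then walks only the set bits, repeatedly extracting the lowest set bit via mask & -mask and clearing it with mask &= mask - 1, so the loop runs popcount(mask) times instead of nbhd_size times.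
import Mathlib
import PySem

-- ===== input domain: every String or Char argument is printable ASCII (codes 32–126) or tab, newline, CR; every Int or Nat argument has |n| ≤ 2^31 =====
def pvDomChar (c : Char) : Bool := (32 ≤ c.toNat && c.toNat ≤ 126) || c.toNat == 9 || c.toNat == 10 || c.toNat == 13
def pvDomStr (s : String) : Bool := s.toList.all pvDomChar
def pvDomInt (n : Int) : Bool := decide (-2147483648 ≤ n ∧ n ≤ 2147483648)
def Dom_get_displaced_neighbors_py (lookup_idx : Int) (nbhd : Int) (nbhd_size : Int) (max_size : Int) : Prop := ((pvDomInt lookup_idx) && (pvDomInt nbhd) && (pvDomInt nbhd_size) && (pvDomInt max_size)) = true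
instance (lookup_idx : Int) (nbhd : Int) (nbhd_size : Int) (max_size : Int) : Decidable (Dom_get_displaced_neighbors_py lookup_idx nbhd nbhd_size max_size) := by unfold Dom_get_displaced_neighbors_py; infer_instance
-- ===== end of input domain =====

-- B walks only the set bits of the masked neighborhood (lowest-set-bit extraction on a
-- shrinking bitmask) instead of testing every bit position up to nbhd_size; alternative
-- decomposition, return value proved equal wherever A returns (Pre_ excludes A's ValueErrors).


-- ===== PORT A =====
-- 'for i in range(nbhd_size): if nbhd & (1 << i) > 0: result.append((lookup_idx+i) % max_size)';
-- the two 'raise ValueError' branches return [] here and are excluded by Pre_.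
def get_displaced_neighbors_py (lookup_idx : Int) (nbhd : Int) (nbhd_size : Int) (max_size : Int) : List Int :=
  if lookup_idx < 0 then []
  else if lookup_idx ≥ max_size then []
  else
    (PySem.List.pyRange 0 nbhd_size 1).foldl
      (fun r i =>
        if 0 < PySem.Int.band nbhd ((1 : Int) <<< i) then
          r ++ [PySem.Int.mod (lookup_idx + i) max_size]
        else r)
      []

-- ===== PORT B =====
-- 'while mask: i = (mask & -mask).bit_length() - 1; append; mask &= mask - 1'.
-- Source B's mask is always a nonnegative int, so it is carried as a Nat here; 'mask &= mask - 1'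
-- is Nat '&&&' (exact: both operands are nonnegative), the lowest-set-bit probe stays the
-- literal 'band mask (-mask)' on Int.
def pvAltLoop (lookup_idx : Int) (max_size : Int) (mask : Nat) : List Int :=
  if h : mask = 0 then []
  else
    PySem.Int.mod (lookup_idx + ((PySem.Int.bitLength (PySem.Int.band (mask : Int) (-(mask : Int))) - 1 : Nat) : Int)) max_size
      :: pvAltLoop lookup_idx max_size (mask &&& (mask - 1))
termination_by mask
decreasing_by
  have h1 : mask &&& (mask - 1) ≤ mask - 1 := Nat.and_le_right
  omega

def get_displaced_neighbors_py_alt (lookup_idx : Int) (nbhd : Int) (nbhd_size : Int) (max_size : Int) : List Int :=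
  if lookup_idx < 0 then []
  else if lookup_idx ≥ max_size then []
  else
    pvAltLoop lookup_idx max_size
      (if 0 < nbhd_size then (PySem.Int.band nbhd (((1 : Int) <<< nbhd_size) - 1)).toNat else 0)

-- ===== PRECONDITION & SPEC =====
-- Pre_ excludes exactly the inputs where A raises ValueError (negative index or index
-- outside the array); B raises the same errors there.
def Pre_get_displaced_neighbors_py (lookup_idx : Int) (nbhd : Int) (nbhd_size : Int) (max_size : Int) : Prop :=
  0 ≤ lookup_idx ∧ lookup_idx < max_size
instance (lookup_idx : Int) (nbhd : Int) (nbhd_size : Int) (max_size : Int) : Decidable (Pre_get_displaced_neighbors_py lookup_idx nbhd nbhd_size max_size) := by unfold Pre_get_displaced_neighbors_py; infer_instance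

def pvWitness_get_displaced_neighbors_py : Int × Int × Int × Int := (1, 5, 3, 4)

def Spec_get_displaced_neighbors_py (lookup_idx : Int) (nbhd : Int) (nbhd_size : Int) (max_size : Int) (out : List Int) : Prop := out = get_displaced_neighbors_py_alt lookup_idx nbhd nbhd_size max_size
instance (lookup_idx : Int) (nbhd : Int) (nbhd_size : Int) (max_size : Int) (out : List Int) : Decidable (Spec_get_displaced_neighbors_py lookup_idx nbhd nbhd_size max_size out) := by unfold Spec_get_displaced_neighbors_py; infer_instance

-- ===== CLAIM (what is proved, stated in full; the proofs are below) =====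
def Claim_equal_get_displaced_neighbors_py : Prop := ∀ (lookup_idx : Int) (nbhd : Int) (nbhd_size : Int) (max_size : Int), Dom_get_displaced_neighbors_py lookup_idx nbhd nbhd_size max_size → Pre_get_displaced_neighbors_py lookup_idx nbhd nbhd_size max_size → Spec_get_displaced_neighbors_py lookup_idx nbhd nbhd_size max_size (get_displaced_neighbors_py lookup_idx nbhd nbhd_size max_size)

-- ===== LEMMAS AND PROOFS =====

lemma pv_shift (k : Nat) : ((1 : Int) <<< ((k : Nat) : Int)) = ((2 ^ k : Nat) : Int) :=
  Int.one_shiftLeft k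

-- Python two's-complement '&' of a nonnegative and a negative int, read off PySem's definition
lemma pv_band_neg_pos (a : Int) (ha : a < 0) (b : Nat) :
    PySem.Int.band a (b : Int) = ((b - (b &&& (-a - 1).toNat) : Nat) : Int) := by
  simp [PySem.Int.band, Int.not_le.mpr ha]

lemma pv_band_self_neg (a : Nat) (ha : 0 < a) :
    PySem.Int.band (a : Int) (-(a : Int)) = ((a - (a &&& (a - 1)) : Nat) : Int) := by
  have hneg : ¬ (0 ≤ -(a : Int)) := by omega
  have ht : (-(-((a : Nat) : Int)) - 1).toNat = a - 1 := by omega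
  simp only [PySem.Int.band]
  rw [if_pos (by positivity), if_neg hneg, ht, Int.toNat_natCast]

-- an even number's '&' only looks at the halves above bit 0
lemma pv_and_two_mul (a b : Nat) : (2 * a) &&& b = 2 * (a &&& (b / 2)) := by
  apply Nat.eq_of_testBit_eq
  intro i
  cases i with
  | zero => simp [Nat.testBit_zero, Nat.mul_mod_right]
  | succ i =>
      conv_lhs => rw [Nat.testBit_and]
      simp only [Nat.testBit_add_one]
      rw [Nat.mul_div_cancel_left _ (by norm_num : (0:Nat) < 2),
        Nat.mul_div_cancel_left _ (by norm_num : (0:Nat) < 2), Nat.testBit_and]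

lemma pv_odd_and (m : Nat) (h : m % 2 = 1) : m &&& (m - 1) = m - 1 := by
  have h2 : m - 1 = 2 * (m / 2) := by omega
  rw [Nat.and_comm, h2, pv_and_two_mul, Nat.and_self]

-- clearing the lowest set bit commutes with doubling: the loop on 2*t is the loop on t
-- with every emitted index shifted by one
lemma pv_loop_even (t : Nat) : ∀ (l mx : Int), pvAltLoop l mx (2 * t) = pvAltLoop (l + 1) mx t := by
  induction t using Nat.strong_induction_on with
  | _ t IH =>
    intro l mx
    by_cases h0 : t = 0
    · subst h0; simp [pvAltLoop]
    · have ht : 0 < t := Nat.pos_of_ne_zero h0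
      have hu : t &&& (t - 1) ≤ t - 1 := Nat.and_le_right
      set u := t &&& (t - 1) with hudef
      have hand : (2 * t) &&& (2 * t - 1) = 2 * u := by
        have h1 : (2 * t - 1) / 2 = t - 1 := by omega
        rw [pv_and_two_mul, h1]
      have hb2 : PySem.Int.band ((2 * t : Nat) : Int) (-((2 * t : Nat) : Int)) = ((2 * (t - u) : Nat) : Int) := by
        rw [pv_band_self_neg (2 * t) (by omega), hand]
        congr 1; omega
      have hb1 : PySem.Int.band ((t : Nat) : Int) (-((t : Nat) : Int)) = ((t - u : Nat) : Int) :=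
        pv_band_self_neg t ht
      have hpos : 0 < t - u := by omega
      have hlen : PySem.Int.bitLength ((2 * (t - u) : Nat) : Int)
          = PySem.Int.bitLength ((t - u : Nat) : Int) + 1 := by
        rw [PySem.Int.bitLength_natCast (by omega)]
        congr 2; omega
      have hge : 1 ≤ PySem.Int.bitLength ((t - u : Nat) : Int) := by
        rw [PySem.Int.bitLength_natCast hpos]; omega
      have htail : pvAltLoop l mx (2 * u) = pvAltLoop (l + 1) mx u := IH u (by omega) l mx
      conv_lhs => rw [pvAltLoop]
      rw [dif_neg (by omega : ¬ (2 * t = 0))]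
      conv_rhs => rw [pvAltLoop]
      rw [dif_neg h0]
      rw [hb2, hb1, hlen, hand, htail]
      congr 2
      omega

lemma pv_range_shift (s : Nat) (m : Nat) (l mx : Int) :
    ((List.range (s+1)).filter m.testBit).map (fun k : Nat => PySem.Int.mod (l + (k : Int)) mx)
      = (if m.testBit 0 then [PySem.Int.mod l mx] else [])
        ++ ((List.range s).filter (m/2).testBit).map (fun k : Nat => PySem.Int.mod ((l+1) + (k : Int)) mx) := by
  rw [List.range_succ_eq_map, List.filter_cons]
  have hmap : ∀ xs : List Nat, xs.map ((fun k : Nat => PySem.Int.mod (l + (k : Int)) mx) ∘ Nat.succ)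
      = xs.map (fun k : Nat => PySem.Int.mod ((l+1) + (k : Int)) mx) := by
    intro xs
    apply List.map_congr_left
    intro a _
    simp only [Function.comp]
    congr 1
    push_cast
    ring
  have hfil : (List.map Nat.succ (List.range s)).filter m.testBit
      = ((List.range s).filter (m/2).testBit).map Nat.succ := by
    rw [List.filter_map]
    congr 1
    apply List.filter_congr
    intro a _
    simp [Function.comp, Nat.succ_eq_add_one, Nat.testBit_add_one]
  cases hb : m.testBit 0
  · simp only [hb, Bool.false_eq_true, if_false, List.nil_append, hfil, List.map_map, hmap]
  · simp only [hb, if_true, hfil, List.map_map, hmap]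
    simp
    intro a _ _
    congr 1
    push_cast
    ring

lemma pv_loop_bits (s' : Nat) : ∀ (m : Nat), m < 2 ^ s' → ∀ (l mx : Int),
    pvAltLoop l mx m
      = ((List.range s').filter m.testBit).map (fun k : Nat => PySem.Int.mod (l + (k : Int)) mx) := by
  induction s' with
  | zero =>
      intro m hm l mx
      have h0 : m = 0 := by omega
      subst h0
      simp [pvAltLoop]
  | succ s IH =>
      intro m hm l mx
      by_cases h0 : m = 0
      · subst h0
        simp [pvAltLoop, Nat.zero_testBit]
      · have hpow : 2 ^ (s + 1) = 2 * 2 ^ s := by ring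
        have hm2 : m / 2 < 2 ^ s := by omega
        have tail := IH (m / 2) hm2 (l + 1) mx
        rw [pv_range_shift]
        rcases Nat.mod_two_eq_zero_or_one m with hpar | hpar
        · have hbit0 : m.testBit 0 = false := by simp [Nat.testBit_zero, hpar]
          have hL : pvAltLoop l mx m = pvAltLoop (l + 1) mx (m / 2) := by
            conv_lhs => rw [show m = 2 * (m / 2) by omega]
            exact pv_loop_even _ _ _
          rw [hL, tail, hbit0]
          simp
        · have hbit0 : m.testBit 0 = true := by simp [Nat.testBit_zero, hpar]
          have hband1 : PySem.Int.band ((m : Nat) : Int) (-((m : Nat) : Int)) = ((1 : Nat) : Int) := by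
            rw [pv_band_self_neg m (by omega), pv_odd_and m hpar]
            congr 1
            omega
          conv_lhs => rw [pvAltLoop]
          rw [dif_neg h0, hband1]
          have hbl : PySem.Int.bitLength (((1 : Nat) : Int)) = 1 := by decide
          rw [hbl, pv_odd_and m hpar, show m - 1 = 2 * (m / 2) by omega, pv_loop_even, tail, hbit0]
          simp

lemma pv_mask_cast (s' : Nat) : ((1 : Int) <<< ((s' : Nat) : Int)) - 1 = ((2 ^ s' - 1 : Nat) : Int) := by
  rw [pv_shift]
  have : 1 ≤ 2 ^ s' := Nat.one_le_two_pow
  push_cast [this]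
  ring

lemma pv_mask_nonneg (N : Nat) (s' : Nat) :
    (PySem.Int.band (N : Int) (((1 : Int) <<< ((s' : Nat) : Int)) - 1)).toNat = N % 2 ^ s' := by
  rw [pv_mask_cast, PySem.Int.band_natCast, Int.toNat_natCast, Nat.and_two_pow_sub_one_eq_mod]

lemma pv_mask_neg (a : Int) (ha : a < 0) (s' : Nat) :
    (PySem.Int.band a (((1 : Int) <<< ((s' : Nat) : Int)) - 1)).toNat = 2 ^ s' - ((-a - 1).toNat % 2 ^ s' + 1) := by
  rw [pv_mask_cast, pv_band_neg_pos a ha, Int.toNat_natCast, Nat.and_comm, Nat.and_two_pow_sub_one_eq_mod]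
  have h1 : (-a - 1).toNat % 2 ^ s' < 2 ^ s' := Nat.mod_lt _ (Nat.two_pow_pos _)
  omega

lemma pv_mask_lt (nbhd : Int) (s' : Nat) :
    (PySem.Int.band nbhd (((1 : Int) <<< ((s' : Nat) : Int)) - 1)).toNat < 2 ^ s' := by
  rcases (em (0 ≤ nbhd)).imp_right (fun hn => by omega : ¬ 0 ≤ nbhd → nbhd < 0) with h | h
  · obtain ⟨N, rfl⟩ : ∃ N : Nat, nbhd = (N : Int) := ⟨nbhd.toNat, (Int.toNat_of_nonneg h).symm⟩
    rw [pv_mask_nonneg]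
    exact Nat.mod_lt _ (Nat.two_pow_pos _)
  · rw [pv_mask_neg nbhd h]
    have : 0 < 2 ^ s' := Nat.two_pow_pos _
    omega

lemma pv_bitA (nbhd : Int) (s' k : Nat) (hk : k < s') :
    (0 < PySem.Int.band nbhd ((1 : Int) <<< ((k : Nat) : Int)))
      ↔ Nat.testBit ((PySem.Int.band nbhd (((1 : Int) <<< ((s' : Nat) : Int)) - 1)).toNat) k := by
  rcases (em (0 ≤ nbhd)).imp_right (fun hn => by omega : ¬ 0 ≤ nbhd → nbhd < 0) with h | h
  · obtain ⟨N, rfl⟩ : ∃ N : Nat, nbhd = (N : Int) := ⟨nbhd.toNat, (Int.toNat_of_nonneg h).symm⟩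
    rw [pv_mask_nonneg, pv_shift, PySem.Int.band_natCast, Nat.and_two_pow,
      Nat.testBit_mod_two_pow]
    simp only [hk, decide_true, Bool.true_and]
    cases hN : N.testBit k <;> simp [hN, Nat.two_pow_pos _]
  · rw [pv_mask_neg nbhd h, pv_shift, pv_band_neg_pos nbhd h, Nat.and_comm, Nat.and_two_pow]
    have hmlt : (-nbhd - 1).toNat % 2 ^ s' < 2 ^ s' := Nat.mod_lt _ (Nat.two_pow_pos _)
    rw [Nat.testBit_two_pow_sub_succ hmlt, Nat.testBit_mod_two_pow]
    simp only [hk, decide_true, Bool.true_and]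
    have hp := Nat.two_pow_pos k
    cases hc : (-nbhd - 1).toNat.testBit k <;> simp [hc] <;> omega

-- ===== VERDICT (by name: the statement is the Claim_ definition above) =====
theorem get_displaced_neighbors_py_spec : Claim_equal_get_displaced_neighbors_py := by
  unfold Claim_equal_get_displaced_neighbors_py
  intro l nbhd s mx _hdom hpre
  obtain ⟨h0, hlt⟩ := hpre
  unfold Spec_get_displaced_neighbors_py get_displaced_neighbors_py get_displaced_neighbors_py_alt
  rw [if_neg (by omega : ¬ l < 0), if_neg (by omega : ¬ l ≥ mx),
    if_neg (by omega : ¬ l < 0), if_neg (by omega : ¬ l ≥ mx)]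
  by_cases hs : 0 < s
  · have hcast : s = ((s.toNat : Nat) : Int) := by omega
    rw [hcast]
    rw [if_pos (by omega : (0:Int) < ((s.toNat : Nat) : Int))]
    have hA : (PySem.List.pyRange 0 ((s.toNat : Nat) : Int) 1).foldl
        (fun r i => if 0 < PySem.Int.band nbhd ((1 : Int) <<< i) then r ++ [PySem.Int.mod (l + i) mx] else r) []
        = ((PySem.List.pyRange 0 ((s.toNat : Nat) : Int) 1).filter
            (fun i => decide (0 < PySem.Int.band nbhd ((1 : Int) <<< i)))).map
            (fun i => PySem.Int.mod (l + i) mx) := by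
      rw [show (fun (r : List Int) i => if 0 < PySem.Int.band nbhd ((1 : Int) <<< i) then r ++ [PySem.Int.mod (l + i) mx] else r)
            = (fun (r : List Int) i => if (fun i : Int => decide (0 < PySem.Int.band nbhd ((1 : Int) <<< i))) i = true then r ++ [(fun i : Int => PySem.Int.mod (l + i) mx) i] else r) from by
          funext r i; simp]
      rw [PySem.List.foldl_append_if]
      simp
    rw [hA, PySem.List.pyRange_one]
    simp only [sub_zero, zero_add]
    rw [List.filter_map, List.map_map]
    simp only [Int.toNat_natCast, Nat.cast_zero]
    have hfil : (List.range s.toNat).filter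
          ((fun i : Int => decide (0 < PySem.Int.band nbhd ((1 : Int) <<< i))) ∘ (fun k : Nat => (k : Int)))
        = (List.range s.toNat).filter
            (Nat.testBit ((PySem.Int.band nbhd (((1 : Int) <<< ((s.toNat : Nat) : Int)) - 1)).toNat)) := by
      apply List.filter_congr
      intro k hk
      rw [Bool.eq_iff_iff]
      simp only [Function.comp, decide_eq_true_eq]
      exact pv_bitA nbhd s.toNat k (List.mem_range.mp hk)
    rw [hfil, pv_loop_bits s.toNat _ (pv_mask_lt nbhd s.toNat) l mx]
    simp [Function.comp]
  · rw [if_neg hs]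
    rw [PySem.List.pyRange_one_eq_nil (by omega : s ≤ 0)]
    simp [pvAltLoop]
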